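-- pv_equiv track=rewrite | github.com/TheoDlmz/DBCOMSOC | winners/pw.py | aggregate_set
-- ===== SOURCE A (Python) =====
-- def aggregate_set(matrix_rank,m):
--     dico = dict()
--     roots_list = []
--     roots_count = []
--     i = 0
--     for roots in matrix_rank:
--         if str(roots) in dico.keys():
--             roots_count[dico[str(roots)]] += 1
--         else:
--             roots_count.append(1)
--             roots_list.append(roots)
--             dico[str(roots)] = i
--             i+=1
--     return roots_list,roots_count
-- ===== SOURCE B (Python) =====
-- def aggregate_set(matrix_rank, m):
--     # Two staged passes, no dict: order-preserving dedup, then count each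
--     # distinct row with list.count (rows are lists of ints, so == matches
--     # A's str(row) keying exactly).
--     roots_list = []
--     for roots in matrix_rank:
--         if roots not in roots_list:
--             roots_list.append(roots)
--     return roots_list, [matrix_rank.count(r) for r in roots_list]
-- ===== Notes on version B (the rewrite author's own statement) =====
-- stated objective: simpler
-- what changed: Drops the dict and the manual index counter entirely: B is two staged passes, an order-preserving dedup by list membership followed by a list.count per distinct row, trading A's single dict-indexed pass for a shorter quadratic dedup-then-count decomposition.
import Mathlib
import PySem

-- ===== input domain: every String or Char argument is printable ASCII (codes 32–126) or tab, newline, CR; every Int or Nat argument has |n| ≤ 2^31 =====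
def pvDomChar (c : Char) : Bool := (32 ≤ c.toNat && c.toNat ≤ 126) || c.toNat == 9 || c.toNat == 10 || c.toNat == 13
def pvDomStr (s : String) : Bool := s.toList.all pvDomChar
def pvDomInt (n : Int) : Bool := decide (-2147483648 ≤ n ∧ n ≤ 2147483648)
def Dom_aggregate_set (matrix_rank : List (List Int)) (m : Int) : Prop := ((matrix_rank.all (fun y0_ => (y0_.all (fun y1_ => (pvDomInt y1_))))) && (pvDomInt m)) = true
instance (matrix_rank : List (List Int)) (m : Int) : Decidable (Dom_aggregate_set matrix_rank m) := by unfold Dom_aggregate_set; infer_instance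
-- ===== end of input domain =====

-- B replaces A's one-pass dict-with-index-counter by two staged passes: an order-preserving dedup
-- by list membership, then a count per distinct row (objective: simpler; B is not faster).

-- ===== PORT A =====
-- A uses str(roots) only as a dictionary key; ported as the List Int itself — exact, since str is
-- injective on lists of ints, so key equality/membership coincide.
def aggStepA (st : PySem.Dict (List Int) Int × List (List Int) × List Int × Int) (roots : List Int) :
    PySem.Dict (List Int) Int × List (List Int) × List Int × Int :=
  if st.1.contains roots then
    -- dico[str(roots)]: the key is present by the branch guard, so getD _ 0 is exact
    let j := st.1.getD roots 0
    -- roots_count[j] += 1: j is always a valid index here (it was stored as a position of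
    -- roots_count), so the total forms pyGetD/pySetD are exact
    (st.1, st.2.1, PySem.List.pySetD st.2.2.1 j (PySem.List.pyGetD st.2.2.1 j 0 + 1), st.2.2.2)
  else
    (st.1.insert roots st.2.2.2, st.2.1 ++ [roots], st.2.2.1 ++ [(1 : Int)], st.2.2.2 + 1)

def aggregate_set (matrix_rank : List (List Int)) (m : Int) : List (List Int) × List Int :=
  let st := matrix_rank.foldl aggStepA (PySem.Dict.empty, [], [], 0)
  (st.2.1, st.2.2.1)

-- ===== PORT B =====
-- first pass: "if roots not in roots_list: roots_list.append(roots)"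
def dedupStep (u : List (List Int)) (roots : List Int) : List (List Int) :=
  if roots ∈ u then u else u ++ [roots]

def aggregate_set_alt (matrix_rank : List (List Int)) (m : Int) : List (List Int) × List Int :=
  let roots_list := matrix_rank.foldl dedupStep []
  -- second pass: [matrix_rank.count(r) for r in roots_list]
  (roots_list, roots_list.map (fun r => (matrix_rank.count r : Int)))

-- ===== PRECONDITION & SPEC =====
def Spec_aggregate_set (matrix_rank : List (List Int)) (m : Int) (out : List (List Int) × List Int) : Prop := out = aggregate_set_alt matrix_rank m
instance (matrix_rank : List (List Int)) (m : Int) (out : List (List Int) × List Int) : Decidable (Spec_aggregate_set matrix_rank m out) := by unfold Spec_aggregate_set; infer_instance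

-- ===== CLAIM (what is proved, stated in full; the proofs are below) =====
def Claim_equal_aggregate_set : Prop := ∀ (matrix_rank : List (List Int)) (m : Int), Dom_aggregate_set matrix_rank m → Spec_aggregate_set matrix_rank m (aggregate_set matrix_rank m)

-- ===== LEMMAS AND PROOFS =====

-- A's dict after first-occurrence list rl, as an item list (key, index), indices from i
def dAitems : List (List Int) → Int → List ((List Int) × Int)
  | [], _ => []
  | r :: rl, i => (r, i) :: dAitems rl (i + 1)

theorem containsA (r : List Int) : ∀ (rl : List (List Int)) (i : Int),
    (PySem.Dict.mk (dAitems rl i)).contains r = decide (r ∈ rl) := by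
  intro rl
  induction rl with
  | nil => intro i; simp [dAitems, PySem.Dict.contains]
  | cons r' rl ih =>
    intro i
    simp only [dAitems, PySem.Dict.contains, List.any_cons] at *
    by_cases h : r' = r
    · subst h; simp
    · simp [h, Ne.symm h, ← ih (i + 1)]

theorem getA (r : List Int) : ∀ (rl : List (List Int)) (i : Int), r ∈ rl →
    (PySem.Dict.mk (dAitems rl i)).get? r = some (i + (rl.idxOf r : Int)) := by
  intro rl
  induction rl with
  | nil => intro i h; simp at h
  | cons r' rl ih =>
    intro i h
    by_cases hr : r' = r
    · subst hr
      simp [dAitems, PySem.Dict.get?_mk_cons, List.idxOf_cons_self]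
    · have hmem : r ∈ rl := by
        rcases List.mem_cons.mp h with h1 | h1
        · exact absurd h1.symm hr
        · exact h1
      rw [dAitems, PySem.Dict.get?_mk_cons]
      simp only [beq_iff_eq, hr, if_false]
      rw [ih (i + 1) hmem, List.idxOf_cons_ne _ (by exact hr)]
      push_cast
      ring_nf

theorem dAitems_append (r : List Int) : ∀ (rl : List (List Int)) (i : Int),
    dAitems (rl ++ [r]) i = dAitems rl i ++ [(r, i + (rl.length : Int))] := by
  intro rl
  induction rl with
  | nil => intro i; simp [dAitems]
  | cons r' rl ih =>
    intro i
    simp only [List.cons_append, dAitems, ih (i + 1), List.length_cons]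
    push_cast
    ring_nf

-- the dedup prefix computed so far
def dd (p : List (List Int)) : List (List Int) := p.foldl dedupStep []

theorem mem_foldl_dedup (x : List Int) : ∀ (p : List (List Int)) (u : List (List Int)),
    (x ∈ p.foldl dedupStep u ↔ x ∈ u ∨ x ∈ p) := by
  intro p
  induction p with
  | nil => intro u; simp
  | cons r p ih =>
    intro u
    rw [List.foldl_cons, ih]
    unfold dedupStep
    split_ifs with h
    · constructor
      · rintro (h1 | h1) <;> simp [h1]
      · rintro (h1 | h1)
        · exact Or.inl h1
        · rcases List.mem_cons.mp h1 with rfl | h2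
          · exact Or.inl h
          · exact Or.inr h2
    · simp only [List.mem_append, List.mem_cons]
      tauto

theorem mem_dd (x : List Int) (p : List (List Int)) : x ∈ dd p ↔ x ∈ p := by
  unfold dd; rw [mem_foldl_dedup]; simp

theorem nodup_foldl_dedup : ∀ (p : List (List Int)) (u : List (List Int)),
    u.Nodup → (p.foldl dedupStep u).Nodup := by
  intro p
  induction p with
  | nil => intro u h; simpa
  | cons r p ih =>
    intro u h
    rw [List.foldl_cons]
    apply ih
    unfold dedupStep
    split_ifs with hm
    · exact h
    · simp only [List.nodup_append, List.nodup_singleton, true_and]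
      refine ⟨h, ?_⟩
      intro a ha b hb
      rw [List.mem_singleton] at hb
      subst hb
      exact fun he => hm (he ▸ ha)

theorem nodup_dd (p : List (List Int)) : (dd p).Nodup := nodup_foldl_dedup p [] (by simp)

theorem dd_append (p : List (List Int)) (r : List Int) :
    dd (p ++ [r]) = dedupStep (dd p) r := by
  unfold dd; rw [List.foldl_append]; rfl

-- getD of a mapped list at the first index of a member
theorem getD_map_idxOf (u : List (List Int)) (f : List Int → Int) (r : List Int) (h : r ∈ u) :
    (u.map f).getD (u.idxOf r) 0 = f r := by
  have hlt : u.idxOf r < u.length := List.idxOf_lt_length_of_mem h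
  rw [List.getD_eq_getElem _ _ (by simpa using hlt), List.getElem_map, List.getElem_idxOf]

-- incrementing the count of r = setting the mapped list at r's first index
theorem map_set_idxOf (f : List Int → Int) (r : List Int) : ∀ (u : List (List Int)),
    u.Nodup → r ∈ u →
    u.map (fun x => if x = r then f x + 1 else f x) = (u.map f).set (u.idxOf r) (f r + 1) := by
  intro u
  induction u with
  | nil => intro _ h; simp at h
  | cons a u ih =>
    intro hnd hm
    by_cases ha : a = r
    · subst ha
      rw [List.idxOf_cons_self]
      simp only [List.map_cons, List.set_cons_zero]
      congr 1
      apply List.map_congr_left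
      intro x hx
      have : x ≠ a := fun he => (List.nodup_cons.mp hnd).1 (he ▸ hx)
      simp [this]
    · have hm' : r ∈ u := by
        rcases List.mem_cons.mp hm with h1 | h1
        · exact absurd h1.symm ha
        · exact h1
      rw [List.idxOf_cons_ne _ (by exact ha)]
      simp only [List.map_cons, List.set_cons_succ, ha, if_false]
      rw [ih (List.nodup_cons.mp hnd).2 hm']

-- count after appending one element
theorem count_append_one (p : List (List Int)) (r x : List Int) :
    ((p ++ [r]).count x : Int) = if x = r then (p.count x : Int) + 1 else (p.count x : Int) := by
  rw [List.count_append]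
  by_cases h : x = r
  · subst h; simp
  · simp [Ne.symm h, h]

-- the abstract state of A's loop after processing prefix p
def stA (p : List (List Int)) : PySem.Dict (List Int) Int × List (List Int) × List Int × Int :=
  (PySem.Dict.mk (dAitems (dd p) 0), dd p,
    (dd p).map (fun x => (p.count x : Int)), ((dd p).length : Int))

theorem stepA_state (p : List (List Int)) (r : List Int) :
    aggStepA (stA p) r = stA (p ++ [r]) := by
  by_cases hmem : r ∈ p
  · have hmd : r ∈ dd p := (mem_dd r p).mpr hmem
    have hcon : (PySem.Dict.mk (dAitems (dd p) 0)).contains r = true := by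
      rw [containsA]; simpa
    have hget : (PySem.Dict.mk (dAitems (dd p) 0)).getD r 0 = (((dd p).idxOf r : Nat) : Int) := by
      rw [PySem.Dict.getD_eq_get?_getD, getA r (dd p) 0 hmd]; simp
    have hdd : dd (p ++ [r]) = dd p := by
      rw [dd_append]; unfold dedupStep; simp [hmd]
    unfold stA aggStepA
    simp only [hcon, if_true, hget, PySem.List.pySetD_natCast, PySem.List.pyGetD_natCast, hdd,
      Prod.mk.injEq, true_and, and_true]
    rw [getD_map_idxOf _ _ _ hmd,
      ← map_set_idxOf (fun x => (p.count x : Int)) r (dd p) (nodup_dd p) hmd]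
    apply List.map_congr_left
    intro x _
    rw [count_append_one]
  · have hmd : r ∉ dd p := fun h => hmem ((mem_dd r p).mp h)
    have hcon : (PySem.Dict.mk (dAitems (dd p) 0)).contains r = false := by
      rw [containsA]; simpa
    have hdd : dd (p ++ [r]) = dd p ++ [r] := by
      rw [dd_append]; unfold dedupStep; simp [hmd]
    unfold stA aggStepA
    simp only [hcon, Bool.false_eq_true, if_false, PySem.Dict.insert, hdd,
      List.map_append, Prod.mk.injEq, true_and]
    refine ⟨?_, ?_, ?_⟩
    · rw [dAitems_append]; norm_num
    · congr 1
      · apply List.map_congr_left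
        intro x hx
        rw [count_append_one]
        have : x ≠ r := fun he => hmd (he ▸ hx)
        simp [this]
      · rw [List.map_singleton, count_append_one]
        have : p.count r = 0 := List.count_eq_zero.mpr hmem
        simp [this]
    · simp

theorem foldA (l : List (List Int)) : ∀ (p : List (List Int)),
    l.foldl aggStepA (stA p) = stA (p ++ l) := by
  induction l with
  | nil => intro p; simp
  | cons r l ih =>
    intro p
    rw [List.foldl_cons, stepA_state, ih]
    simp

-- ===== VERDICT (by name: the statement is the Claim_ definition above) =====
theorem aggregate_set_spec : Claim_equal_aggregate_set := by
  unfold Claim_equal_aggregate_set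
  intro matrix_rank m _
  unfold Spec_aggregate_set aggregate_set aggregate_set_alt
  have h0 : (PySem.Dict.empty, ([] : List (List Int)), ([] : List Int), (0 : Int)) = stA [] := by
    simp [stA, dd, dAitems, PySem.Dict.empty]
  rw [h0, foldA matrix_rank [], List.nil_append]
  rfl
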